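-- pv_equiv track=rewrite | github.com/miliar/Code_Jam_Webscraper | solutions_python/Problem_201/2415.py | next_spot
-- ===== SOURCE A (Python) =====
-- def next_spot(occupied, ls, rs):
--     possible = set()
--     best = -1
--
--     for i in range(1, len(occupied) - 1):
--         if occupied[i] == False:
--             cur = min(ls[i], rs[i])
--
--             if cur > best:
--                 possible = set()
--                 possible.add(i)
--
--                 best = cur
--
--             elif cur == best:
--                 possible.add(i)
--
--     if len(possible) == 1:
--         return possible.pop()
--
--     best = -1
--     next_possible = set()
--
--     for p in possible:
--         cur = max(ls[p], rs[p])
--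
--         if cur > best:
--             next_possible = set()
--             next_possible.add(p)
--
--             best = cur
--
--         elif cur == best:
--             next_possible.add(p)
--
--     return min(next_possible)
-- ===== SOURCE B (Python) =====
-- def next_spot(occupied, ls, rs):
--     return max((i for i in range(1, len(occupied) - 1) if occupied[i] == False),
--                key=lambda i: (min(ls[i], rs[i]), max(ls[i], rs[i])))
-- ===== Notes on version B (the rewrite author's own statement) =====
-- stated objective: simpler
-- what changed: A's two sequential argmax-set collection loops (collect the spots with maximal min(ls,rs) into a set, then re-scan that set for maximal max(ls,rs), then take min) are replaced by one single max over the free interior spots with the lexicographic key (min(ls[i],rs[i]), max(ls[i],rs[i])), whose first-maximum tie-break gives the same smallest index.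
-- crash fix: When some free interior spot exists (all candidates validly indexable) but every one has min(ls[i],rs[i]) < -1, A raises ValueError (min of an empty set, because its best starts at -1) while B returns the spot with the lexicographically greatest (min,max) key. — e.g. on next_spot([false, false, false], [0, -5, 0], [0, -5, 0]): A raises ValueError, B returns 1
import Mathlib
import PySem

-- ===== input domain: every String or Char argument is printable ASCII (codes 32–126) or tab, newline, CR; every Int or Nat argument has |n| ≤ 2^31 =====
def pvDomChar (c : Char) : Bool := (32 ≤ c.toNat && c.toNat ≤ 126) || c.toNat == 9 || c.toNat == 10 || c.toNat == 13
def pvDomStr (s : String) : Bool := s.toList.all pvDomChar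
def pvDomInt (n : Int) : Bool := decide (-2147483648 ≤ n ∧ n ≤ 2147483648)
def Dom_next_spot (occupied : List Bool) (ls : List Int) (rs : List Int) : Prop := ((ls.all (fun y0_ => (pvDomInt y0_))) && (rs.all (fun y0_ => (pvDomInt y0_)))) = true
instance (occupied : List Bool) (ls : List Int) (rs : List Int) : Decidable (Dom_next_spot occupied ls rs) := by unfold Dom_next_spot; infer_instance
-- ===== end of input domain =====

-- B replaces A's two-phase argmax-set collection (collect min-key argmaxes, then max-key, then min index)
-- by a single max over the free interior spots with the lexicographic key (min, max); objective: simpler.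
-- Equality is about the RETURN value; neither program mutates its arguments.

-- ===== PORT A =====
-- the body of both of A's collection loops: reset the set on a strictly better key, add on a tie
def nsStep (k : Int → Int) (st : PySem.Set Int × Int) (i : Int) : PySem.Set Int × Int :=
  if k i > st.2 then (PySem.Set.add PySem.Set.empty i, k i)
  else if k i == st.2 then (PySem.Set.add st.1 i, st.2)
  else st

def next_spot (occupied : List Bool) (ls : List Int) (rs : List Int) : Int :=
  -- for i in range(1, len(occupied) - 1): if occupied[i] == False: … (indices valid under Pre_, hence pyGetD)
  let st1 := (PySem.List.pyRange 1 ((occupied.length : Int) - 1)).foldl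
    (fun st i => if PySem.List.pyGetD occupied i false == false
                 then nsStep (fun j => min (PySem.List.pyGetD ls j 0) (PySem.List.pyGetD rs j 0)) st i
                 else st)
    (PySem.Set.empty, -1)
  if PySem.Set.len st1.1 == 1 then
    st1.1.headD 0      -- possible.pop() on a singleton set
  else
    let st2 := st1.1.foldl
      (nsStep (fun j => max (PySem.List.pyGetD ls j 0) (PySem.List.pyGetD rs j 0)))
      (PySem.Set.empty, -1)
    (PySem.List.min? st2.1 (fun x => x)).getD 0   -- min(next_possible); empty set (ValueError) excluded by Pre_

-- ===== PORT B =====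
def next_spot_alt (occupied : List Bool) (ls : List Int) (rs : List Int) : Int :=
  -- max((i for i in range(1, len(occupied)-1) if occupied[i] == False), key=lambda i: (min(..), max(..)))
  let cand := (PySem.List.pyRange 1 ((occupied.length : Int) - 1)).filter
    (fun i => PySem.List.pyGetD occupied i false == false)
  match PySem.List.max2? cand
      (fun i => min (PySem.List.pyGetD ls i 0) (PySem.List.pyGetD rs i 0))
      (fun i => max (PySem.List.pyGetD ls i 0) (PySem.List.pyGetD rs i 0)) with
  | some j => j
  | none => 0     -- max() on an empty sequence raises ValueError; excluded by Pre_

-- ===== PRECONDITION & SPEC =====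
-- Pre_ = exactly the inputs where A returns: every free interior index is a valid index into ls and rs
-- (else IndexError), and some free interior index has min(ls[i],rs[i]) ≥ -1 (else A's `possible` stays
-- empty — best starts at -1 — and min(set()) raises ValueError).
def Pre_next_spot (occupied : List Bool) (ls : List Int) (rs : List Int) : Prop :=
  (∀ i ∈ PySem.List.pyRange 1 ((occupied.length : Int) - 1),
      PySem.List.pyGetD occupied i false = false → i < (ls.length : Int) ∧ i < (rs.length : Int)) ∧
  (∃ i ∈ PySem.List.pyRange 1 ((occupied.length : Int) - 1),
      PySem.List.pyGetD occupied i false = false ∧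
      -1 ≤ min (PySem.List.pyGetD ls i 0) (PySem.List.pyGetD rs i 0))
instance (occupied : List Bool) (ls : List Int) (rs : List Int) : Decidable (Pre_next_spot occupied ls rs) := by
  unfold Pre_next_spot; infer_instance

def pvWitness_next_spot : List Bool × List Int × List Int :=
  ([true, false, true], [1, 2, 3], [1, 2, 3])

-- When some free interior spot exists (all of them validly indexable) but every one has
-- min(ls[i],rs[i]) < -1, A raises ValueError (min of an empty set) while B returns the spot with the
-- lexicographically greatest (min, max) key.
def Raises_next_spot (occupied : List Bool) (ls : List Int) (rs : List Int) : Prop :=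
  (∀ i ∈ PySem.List.pyRange 1 ((occupied.length : Int) - 1),
      PySem.List.pyGetD occupied i false = false → i < (ls.length : Int) ∧ i < (rs.length : Int)) ∧
  (∃ i ∈ PySem.List.pyRange 1 ((occupied.length : Int) - 1),
      PySem.List.pyGetD occupied i false = false) ∧
  (∀ i ∈ PySem.List.pyRange 1 ((occupied.length : Int) - 1),
      PySem.List.pyGetD occupied i false = false →
      min (PySem.List.pyGetD ls i 0) (PySem.List.pyGetD rs i 0) < -1)
instance (occupied : List Bool) (ls : List Int) (rs : List Int) : Decidable (Raises_next_spot occupied ls rs) := by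
  unfold Raises_next_spot; infer_instance

def pvRaiseWitness_next_spot : List Bool × List Int × List Int :=
  ([false, false, false], [0, -5, 0], [0, -5, 0])
def pvRaiseWitnessOut_next_spot : Int := 1

def Spec_next_spot (occupied : List Bool) (ls : List Int) (rs : List Int) (out : Int) : Prop := out = next_spot_alt occupied ls rs
instance (occupied : List Bool) (ls : List Int) (rs : List Int) (out : Int) : Decidable (Spec_next_spot occupied ls rs out) := by unfold Spec_next_spot; infer_instance

-- ===== CLAIM (what is proved, stated in full; the proofs are below) =====
def Claim_equal_next_spot : Prop := ∀ (occupied : List Bool) (ls : List Int) (rs : List Int), Dom_next_spot occupied ls rs → Pre_next_spot occupied ls rs → Spec_next_spot occupied ls rs (next_spot occupied ls rs)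

def Claim_raises_next_spot : Prop := (∀ (occupied : List Bool) (ls : List Int) (rs : List Int), Dom_next_spot occupied ls rs → Raises_next_spot occupied ls rs → ¬ Pre_next_spot occupied ls rs) ∧ (Dom_next_spot (pvRaiseWitness_next_spot.1) (pvRaiseWitness_next_spot.2.1) (pvRaiseWitness_next_spot.2.2) ∧ Raises_next_spot (pvRaiseWitness_next_spot.1) (pvRaiseWitness_next_spot.2.1) (pvRaiseWitness_next_spot.2.2) ∧ next_spot_alt (pvRaiseWitness_next_spot.1) (pvRaiseWitness_next_spot.2.1) (pvRaiseWitness_next_spot.2.2) = pvRaiseWitnessOut_next_spot)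

-- ===== LEMMAS AND PROOFS =====

-- lexicographic ≤ on Int pairs, written out over components
def lexle (a1 a2 b1 b2 : Int) : Prop := a1 < b1 ∨ (a1 = b1 ∧ a2 ≤ b2)

-- running max of k over a list, A's `best` variable
def mfold (k : Int → Int) (b : Int) (xs : List Int) : Int := xs.foldl (fun m i => max m (k i)) b

lemma le_mfold (k : Int → Int) : ∀ (xs : List Int) (b : Int), b ≤ mfold k b xs := by
  intro xs
  induction xs with
  | nil => intro b; simp [mfold]
  | cons x xs ih =>
    intro b
    calc b ≤ max b (k x) := le_max_left _ _
    _ ≤ mfold k (max b (k x)) xs := ih _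
    _ = mfold k b (x :: xs) := rfl

lemma mfold_ge_mem (k : Int → Int) : ∀ (xs : List Int) (b i : Int), i ∈ xs → k i ≤ mfold k b xs := by
  intro xs
  induction xs with
  | nil => simp
  | cons x xs ih =>
    intro b i hi
    rcases List.mem_cons.mp hi with h | h
    · subst h
      calc k i ≤ max b (k i) := le_max_right _ _
      _ ≤ mfold k (max b (k i)) xs := le_mfold k _ _
    · exact ih _ i h

lemma mfold_exists (k : Int → Int) : ∀ (xs : List Int) (b : Int),
    mfold k b xs = b ∨ ∃ i ∈ xs, k i = mfold k b xs := by
  intro xs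
  induction xs with
  | nil => intro b; left; rfl
  | cons x xs ih =>
    intro b
    rcases ih (max b (k x)) with h | ⟨i, hi, hk⟩
    · show mfold k (max b (k x)) xs = b ∨ _
      rcases lt_or_ge b (k x) with hlt | hle
      · right; exact ⟨x, List.mem_cons_self .., by show k x = mfold k (max b (k x)) xs; rw [h]; omega⟩
      · left; show mfold k (max b (k x)) xs = b; rw [h]; omega
    · right; exact ⟨i, List.mem_cons_of_mem _ hi, hk⟩

lemma set_add_not_mem {P : List Int} {x : Int} (h : x ∉ P) : PySem.Set.add P x = P ++ [x] := by
  simp [PySem.Set.add, PySem.Set.contains, h]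

-- closed form of A's collection loop: the final best is the running max, the final set is (in
-- increasing order) exactly the elements achieving it, preceded by the initial set if best never moved
lemma collect_spec (k : Int → Int) : ∀ (xs P : List Int) (b : Int),
    List.Pairwise (· < ·) (P ++ xs) →
    xs.foldl (nsStep k) (P, b) =
      ((if mfold k b xs = b then P else []) ++ xs.filter (fun i => k i == mfold k b xs),
       mfold k b xs) := by
  intro xs
  induction xs with
  | nil => intro P b _; simp [mfold]
  | cons x xs ih =>
    intro P b hpw
    have hxxs : List.Pairwise (· < ·) (x :: xs) :=
      List.Pairwise.sublist (List.sublist_append_right P (x :: xs)) hpw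
    have hm : mfold k b (x :: xs) = mfold k (max b (k x)) xs := rfl
    show List.foldl (nsStep k) (nsStep k (P, b) x) xs = _
    by_cases hgt : k x > b
    · -- strictly better: the set is reset to {x}
      have hstep : nsStep k (P, b) x = ([x], k x) := by
        simp [nsStep, hgt, PySem.Set.add, PySem.Set.contains, PySem.Set.empty]
      have hmax : max b (k x) = k x := by omega
      have hM : mfold k b (x :: xs) = mfold k (k x) xs := by rw [hm, hmax]
      have hkM : k x ≤ mfold k (k x) xs := le_mfold k xs (k x)
      have hMb : mfold k (k x) xs ≠ b := by omega
      rw [hstep, ih [x] (k x) hxxs, hM]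
      rw [if_neg hMb]
      by_cases hx : k x = mfold k (k x) xs
      · have hbe : (k x == mfold k (k x) xs) = true := beq_iff_eq.mpr hx
        rw [List.filter_cons, if_pos hbe, if_pos hx.symm]
        simp
      · have hbe : (k x == mfold k (k x) xs) = false := beq_eq_false_iff_ne.mpr hx
        have hne : ¬ ((k x == mfold k (k x) xs) = true) := by rw [hbe]; simp
        rw [List.filter_cons, if_neg hne, if_neg (fun h => hx h.symm)]
    · by_cases heq : k x = b
      · -- tie: x is added to the set
        have hxP : x ∉ P := by
          intro hxmem
          have := (List.pairwise_append.mp hpw).2.2 x hxmem x (List.mem_cons_self ..)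
          omega
        have hstep : nsStep k (P, b) x = (P ++ [x], b) := by
          simp [nsStep, heq, set_add_not_mem hxP]
        have hmax : max b (k x) = b := by omega
        have hM : mfold k b (x :: xs) = mfold k b xs := by rw [hm, hmax]
        have hpw2 : List.Pairwise (· < ·) ((P ++ [x]) ++ xs) := by
          rw [List.append_assoc]; simpa using hpw
        rw [hstep, ih (P ++ [x]) b hpw2, hM]
        by_cases hMb : mfold k b xs = b
        · simp only [if_pos hMb, List.filter_cons]
          have : (k x == mfold k b xs) = true := by simp [heq, hMb]
          simp [this, List.append_assoc]
        · simp only [if_neg hMb, List.filter_cons]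
          have : (k x == mfold k b xs) = false := by simp [heq]; omega
          simp [this]
      · -- worse: nothing changes
        have hstep : nsStep k (P, b) x = (P, b) := by simp [nsStep, hgt, heq]
        have hmax : max b (k x) = b := by omega
        have hM : mfold k b (x :: xs) = mfold k b xs := by rw [hm, hmax]
        have hpw3 : List.Pairwise (· < ·) (P ++ xs) :=
          List.Pairwise.sublist (List.Sublist.append_left (List.sublist_cons_self x xs) P) hpw
        rw [hstep, ih P b hpw3, hM]
        have hxb : k x < b := by omega
        have hxM : (k x == mfold k b xs) = false := by
          have := le_mfold k xs b; simp; omega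
        simp [hxM]

-- B's fold (Python max with a tuple key) keeps the first lexicographic maximum
lemma foldB_inv (k1 k2 : Int → Int) : ∀ (xs : List Int) (j : Int),
    List.Pairwise (· < ·) (j :: xs) →
    ∃ j', PySem.List.max2? (j :: xs) k1 k2 = some j' ∧
      j' ∈ j :: xs ∧
      (∀ i ∈ j :: xs, lexle (k1 i) (k2 i) (k1 j') (k2 j')) ∧
      (∀ i ∈ j :: xs, k1 i = k1 j' ∧ k2 i = k2 j' → j' ≤ i) := by
  intro xs
  induction xs with
  | nil =>
    intro j _
    exact ⟨j, rfl, List.mem_cons_self .., by intro i hi; simp at hi; subst hi; right; omega,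
      by intro i hi _; simp at hi; omega⟩
  | cons x xs ih =>
    intro j hpw
    have hjx : j < x := List.rel_of_pairwise_cons hpw (List.mem_cons_self ..)
    have hstep : PySem.List.max2? (j :: x :: xs) k1 k2 =
        if (decide (k1 j < k1 x) || !decide (k1 x < k1 j) && decide (k2 j < k2 x)) = true
        then PySem.List.max2? (x :: xs) k1 k2 else PySem.List.max2? (j :: xs) k1 k2 := by
      by_cases hc : (decide (k1 j < k1 x) || !decide (k1 x < k1 j) && decide (k2 j < k2 x)) = true
      · rw [if_pos hc]; simp [PySem.List.max2?]
        rw [if_pos (show k1 j < k1 x ∨ k1 j ≤ k1 x ∧ k2 j < k2 x by simp at hc; omega)]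
      · rw [if_neg hc]; simp [PySem.List.max2?]
        rw [if_neg (show ¬(k1 j < k1 x ∨ k1 j ≤ k1 x ∧ k2 j < k2 x) by simp at hc; omega)]
    by_cases hc : (decide (k1 j < k1 x) || !decide (k1 x < k1 j) && decide (k2 j < k2 x)) = true
    · -- x strictly improves on j
      rw [hstep, if_pos hc]
      have hlt : k1 j < k1 x ∨ (k1 j = k1 x ∧ k2 j < k2 x) := by
        simp at hc; omega
      have hpw2 : List.Pairwise (· < ·) (x :: xs) := hpw.sublist (List.sublist_cons_self j (x :: xs))
      obtain ⟨j', hfold, hmem, hle, htie⟩ := ih x hpw2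
      have hxle := hle x (List.mem_cons_self ..)
      refine ⟨j', hfold, List.mem_cons_of_mem j hmem, ?_, ?_⟩
      · intro i hi
        rcases List.mem_cons.mp hi with h | h
        · subst h; unfold lexle at *; omega
        · exact hle i h
      · intro i hi hk
        rcases List.mem_cons.mp hi with h | h
        · subst h; unfold lexle at *; omega
        · exact htie i h hk
    · -- j stays the leader
      rw [hstep, if_neg hc]
      have hxj : k1 x < k1 j ∨ (k1 x = k1 j ∧ k2 x ≤ k2 j) := by
        simp at hc; omega
      have hpw2 : List.Pairwise (· < ·) (j :: xs) := by
        have : (j :: xs).Sublist (j :: x :: xs) :=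
          List.cons_sublist_cons.mpr (List.sublist_cons_self x xs)
        exact hpw.sublist this
      obtain ⟨j', hfold, hmem, hle, htie⟩ := ih j hpw2
      have hjle := hle j (List.mem_cons_self ..)
      refine ⟨j', hfold, ?_, ?_, ?_⟩
      · rcases List.mem_cons.mp hmem with h | h
        · subst h; exact List.mem_cons_self ..
        · exact List.mem_cons_of_mem _ (List.mem_cons_of_mem _ h)
      · intro i hi
        rcases List.mem_cons.mp hi with h | h
        · rw [h]; exact hle j (List.mem_cons_self ..)
        rcases List.mem_cons.mp h with h2 | h2
        · subst h2; unfold lexle at *; omega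
        · exact hle i (List.mem_cons_of_mem _ h2)
      · intro i hi hk
        rcases List.mem_cons.mp hi with h | h
        · rw [h] at hk ⊢; exact htie j (List.mem_cons_self ..) hk
        rcases List.mem_cons.mp h with h2 | h2
        · subst h2
          -- key x = key j' together with key x ≤ key j and key j ≤ key j' forces key j = key j'
          have hjj : k1 j = k1 j' ∧ k2 j = k2 j' := by unfold lexle at hjle; omega
          have := htie j (List.mem_cons_self ..) hjj
          omega
        · exact htie i (List.mem_cons_of_mem _ h2) hk

-- ===== VERDICT (by name: the statement is the Claim_ definition above) =====
theorem next_spot_spec : Claim_equal_next_spot := by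
  intro occupied ls rs _ hpre
  unfold Spec_next_spot
  obtain ⟨hbounds, i₀, hi₀r, hocc₀, hge₀⟩ := hpre
  simp only [next_spot, next_spot_alt]
  set K1 : Int → Int := fun j => min (PySem.List.pyGetD ls j 0) (PySem.List.pyGetD rs j 0) with hK1
  set K2 : Int → Int := fun j => max (PySem.List.pyGetD ls j 0) (PySem.List.pyGetD rs j 0) with hK2
  set r := PySem.List.pyRange 1 ((occupied.length : Int) - 1) with hrdef
  set cs := r.filter (fun i => PySem.List.pyGetD occupied i false == false) with hcs
  rw [← List.foldl_filter, ← hcs]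
  have hcs_pw : List.Pairwise (· < ·) cs :=
    List.Pairwise.sublist List.filter_sublist (PySem.List.pairwise_lt_pyRange_one _ _)
  -- phase 1 of A in closed form
  set M1 := mfold K1 (-1) cs with hM1
  set P1 := cs.filter (fun i => K1 i == M1) with hP1
  have hcol1 : List.foldl (nsStep K1) (PySem.Set.empty, -1) cs = (P1, M1) := by
    rw [collect_spec K1 cs PySem.Set.empty (-1) (by simpa [PySem.Set.empty] using hcs_pw)]
    rw [← hM1, ← hP1]
    congr 1
    split <;> simp [PySem.Set.empty]
  rw [hcol1]
  have hmemP1 : ∀ p, p ∈ P1 ↔ (p ∈ cs ∧ K1 p = M1) := by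
    intro p; rw [hP1]; simp [List.mem_filter]
  have hi₀cs : i₀ ∈ cs := by rw [hcs]; exact List.mem_filter.mpr ⟨hi₀r, by simp [hocc₀]⟩
  have hM1ub : ∀ i ∈ cs, K1 i ≤ M1 := fun i hi => mfold_ge_mem K1 cs (-1) i hi
  have hM1lb : -1 ≤ M1 := le_mfold K1 cs (-1)
  have hge₀' : -1 ≤ K1 i₀ := hge₀
  have hP1ne : P1 ≠ [] := by
    rcases mfold_exists K1 cs (-1) with h | ⟨i, hi, hk⟩
    · have h0 : K1 i₀ = M1 := le_antisymm (hM1ub i₀ hi₀cs) (by omega)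
      exact List.ne_nil_of_mem ((hmemP1 i₀).mpr ⟨hi₀cs, h0⟩)
    · exact List.ne_nil_of_mem ((hmemP1 i).mpr ⟨hi, hk⟩)
  -- B's single pass keeps the first lexicographic maximum
  have hcsne : cs ≠ [] := by
    intro h
    exact hP1ne (by rw [hP1, h]; rfl)
  obtain ⟨c, t, hct⟩ := List.exists_cons_of_ne_nil hcsne
  obtain ⟨j', hfoldB, hmemB, hleB, htieB⟩ := foldB_inv K1 K2 t c (hct ▸ hcs_pw)
  rw [← hct] at hmemB hleB htieB
  have hBalt : PySem.List.max2? cs K1 K2 = some j' := by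
    rw [hct]; exact hfoldB
  rw [hBalt]
  show _ = j'
  -- uniqueness of the "first lexicographically best" element
  have huniq : ∀ a, a ∈ cs →
      (∀ i ∈ cs, lexle (K1 i) (K2 i) (K1 a) (K2 a)) →
      (∀ i ∈ cs, K1 i = K1 a ∧ K2 i = K2 a → a ≤ i) → a = j' := by
    intro a ha hle htie
    have h1 := hleB a ha
    have h2 := hle j' hmemB
    have hkeys : K1 a = K1 j' ∧ K2 a = K2 j' := by unfold lexle at h1 h2; omega
    have ht1 := htie j' hmemB ⟨hkeys.1.symm, hkeys.2.symm⟩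
    have ht2 := htieB a ha hkeys
    omega
  by_cases hlen : P1.length = 1
  · -- A's early return: the singleton set
    rw [if_pos (by simp [PySem.Set.len, hlen])]
    obtain ⟨p, hp⟩ := List.length_eq_one_iff.mp hlen
    rw [hp]
    show p = j'
    have hpP1 : p ∈ P1 := by rw [hp]; exact List.mem_cons_self ..
    obtain ⟨hpcs, hpk⟩ := (hmemP1 p).mp hpP1
    refine huniq p hpcs ?_ ?_
    · intro i hi
      by_cases hik : K1 i = M1
      · have : i ∈ P1 := (hmemP1 i).mpr ⟨hi, hik⟩
        rw [hp] at this; simp at this; subst this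
        unfold lexle; omega
      · have := hM1ub i hi
        unfold lexle; omega
    · intro i hi hk
      have : i ∈ P1 := (hmemP1 i).mpr ⟨hi, by omega⟩
      rw [hp] at this; simp at this; omega
  · -- A's second phase
    rw [if_neg (by simp [PySem.Set.len]; omega)]
    set M2 := mfold K2 (-1) P1 with hM2
    set N := P1.filter (fun i => K2 i == M2) with hN
    have hP1pw : List.Pairwise (· < ·) P1 := by
      rw [hP1]; exact List.Pairwise.sublist List.filter_sublist hcs_pw
    have hcol2 : List.foldl (nsStep K2) (PySem.Set.empty, -1) P1 = (N, M2) := by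
      rw [collect_spec K2 P1 PySem.Set.empty (-1) (by simpa [PySem.Set.empty] using hP1pw)]
      rw [← hM2, ← hN]
      congr 1
      split <;> simp [PySem.Set.empty]
    rw [hcol2]
    have hmemN : ∀ q, q ∈ N ↔ (q ∈ P1 ∧ K2 q = M2) := by
      intro q; rw [hN]; simp [List.mem_filter]
    have hK1K2 : ∀ j, K1 j ≤ K2 j := fun j => min_le_max
    have hM2ub : ∀ q ∈ P1, K2 q ≤ M2 := fun q hq => mfold_ge_mem K2 P1 (-1) q hq
    have hNne : N ≠ [] := by
      obtain ⟨p₁, t₁, hp₁⟩ := List.exists_cons_of_ne_nil hP1ne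
      have hp₁P1 : p₁ ∈ P1 := by rw [hp₁]; exact List.mem_cons_self ..
      have hp₁k : -1 ≤ K2 p₁ := by
        have := ((hmemP1 p₁).mp hp₁P1).2
        have := hK1K2 p₁
        omega
      rcases mfold_exists K2 P1 (-1) with h | ⟨q, hq, hk⟩
      · have h0 : K2 p₁ = M2 := le_antisymm (hM2ub p₁ hp₁P1) (by omega)
        exact List.ne_nil_of_mem ((hmemN p₁).mpr ⟨hp₁P1, h0⟩)
      · exact List.ne_nil_of_mem ((hmemN q).mpr ⟨hq, hk⟩)
    rcases hmin : PySem.List.min? N (fun x => x) with _ | m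
    · exact absurd ((PySem.List.min?_eq_none_iff N _).mp hmin) hNne
    · have hmN := PySem.List.min?_mem hmin
      have hmin_min := PySem.List.min?_isMin hmin
      obtain ⟨hmP1, hmK2⟩ := (hmemN m).mp hmN
      obtain ⟨hmcs, hmK1⟩ := (hmemP1 m).mp hmP1
      show m = j'
      refine huniq m hmcs ?_ ?_
      · intro i hi
        by_cases hik : K1 i = M1
        · have hiP1 : i ∈ P1 := (hmemP1 i).mpr ⟨hi, hik⟩
          have := hM2ub i hiP1
          unfold lexle; omega
        · have := hM1ub i hi
          unfold lexle; omega
      · intro i hi hk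
        have hiP1 : i ∈ P1 := (hmemP1 i).mpr ⟨hi, by omega⟩
        have hiN : i ∈ N := (hmemN i).mpr ⟨hiP1, by omega⟩
        exact hmin_min i hiN

@[simp] theorem next_spot_raises : Claim_raises_next_spot := by
  unfold Claim_raises_next_spot
  refine ⟨?_, by decide⟩
  intro occupied ls rs _ hrr hpre
  obtain ⟨i, hir, hocc, hge⟩ := hpre.2
  have := hrr.2.2 i hir hocc
  omega
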